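-- pv_equiv track=rewrite | github.com/flyingsurveyor/qrfs | qrfs/core/pdfgen.py | _interleave_page
-- ===== SOURCE A (Python) =====
-- def _interleave_page(chunks_on_page: list) -> list:
--     n = len(chunks_on_page)
--     if n <= 1:
--         return list(chunks_on_page)
--     stride = 7 if n >= 7 else 3
--     result = [None] * n
--     slot = 0
--     for chunk in chunks_on_page:
--         result[slot] = chunk
--         slot = (slot + stride) % n
--         while result[slot] is not None and any(r is None for r in result):
--             slot = (slot + 1) % n
--     return result
-- ===== SOURCE B (Python) =====
-- def _interleave_page(chunks_on_page: list) -> list: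
--     n = len(chunks_on_page)
--     if n <= 1:
--         return list(chunks_on_page)
--     stride = 7 if n >= 7 else 3
--     result = [None] * n
--     # nxt[i] = i while slot i is free; an occupied slot points towards the next
--     # candidate free slot above it (path-compressed on lookup); sentinel n = "none above".
--     nxt = list(range(n + 1))
--
--     def next_free(i):
--         root = i
--         while nxt[root] != root:
--             root = nxt[root]
--         while nxt[i] != root:  # path compression
--             nxt[i], i = root, nxt[i]
--         return root
--
--     result[0] = chunks_on_page[0]
--     nxt[0] = 1
--     slot = 0
--     for chunk in chunks_on_page[1:]:
--         target = (slot + stride) % n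
--         slot = next_free(target)
--         if slot == n:  # wrap around: take the lowest free slot
--             slot = next_free(0)
--         result[slot] = chunk
--         nxt[slot] = slot + 1
--     return result
-- ===== Notes on version B (the rewrite author's own statement) =====
-- stated objective: alternative
-- what changed: A resolves slot collisions by linear probing whose loop condition rescans the entire result list for a remaining None on every single probe step; B instead keeps a path-compressed next-free-slot pointer array (union-find style) and jumps to the cyclically next free slot directly, so both the step-by-step probing loop and the per-step rescan disappear.
import Mathlib
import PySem

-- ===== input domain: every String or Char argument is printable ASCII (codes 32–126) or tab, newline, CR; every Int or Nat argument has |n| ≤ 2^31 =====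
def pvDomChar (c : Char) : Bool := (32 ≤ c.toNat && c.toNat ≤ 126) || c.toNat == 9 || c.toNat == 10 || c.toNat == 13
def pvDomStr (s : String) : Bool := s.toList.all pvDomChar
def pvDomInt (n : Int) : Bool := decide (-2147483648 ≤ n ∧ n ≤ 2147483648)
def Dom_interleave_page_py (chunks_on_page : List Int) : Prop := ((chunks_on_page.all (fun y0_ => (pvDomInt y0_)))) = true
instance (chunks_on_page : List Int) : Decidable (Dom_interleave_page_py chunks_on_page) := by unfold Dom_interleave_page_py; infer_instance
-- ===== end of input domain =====

-- B replaces A's linear probing (whose loop condition rescans the whole result list for a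
-- remaining None on every probe step) by a path-compressed next-free-slot pointer array,
-- so collisions are resolved without stepping slot by slot; same return value (alternative
-- algorithm; a timing run, not this file, decides any speed label).

-- ===== PORT A =====
-- the inner `while` of A: step slot by 1 (mod n) while the slot is taken and a None remains;
-- fuel `res.length` always suffices (a None, if any, lies within n cyclic steps)
def pvProbeA (res : List (Option Int)) : Nat → Nat → Nat
  | slot, 0 => slot
  | slot, fuel+1 =>
    if res.getD slot none ≠ none ∧ res.any (fun r => r == none) = true then
      pvProbeA res ((slot + 1) % res.length) fuel
    else slot

def pvLoopA (stride : Nat) : List Int → List (Option Int) → Nat → List (Option Int)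
  | [], res, _ => res
  | c :: rest, res, slot =>
    let res' := res.set slot (some c)
    pvLoopA stride rest res' (pvProbeA res' ((slot + stride) % res'.length) res'.length)

def interleave_page_py (chunks_on_page : List Int) : List Int :=
  let n := chunks_on_page.length
  if n ≤ 1 then chunks_on_page
  else
    let stride := if 7 ≤ n then 7 else 3
    (pvLoopA stride chunks_on_page (List.replicate n none) 0).map (fun o => o.getD 0)

-- B: the first while of next_free (root chasing); fuel nxt.length always suffices

-- ===== PORT B =====
-- the two `while` loops of B's next_free: root chasing, then path compression; fuel
-- `nxt.length` always suffices (the chain is strictly increasing and bounded by n)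
def pvChase (nxt : List Nat) : Nat → Nat → Nat
  | root, 0 => root
  | root, fuel+1 =>
    if nxt.getD root 0 ≠ root then pvChase nxt (nxt.getD root 0) fuel else root

-- B: the second while of next_free (path compression)
def pvCompress (root : Nat) : List Nat → Nat → Nat → List Nat
  | nxt, _, 0 => nxt
  | nxt, i, fuel+1 =>
    if nxt.getD i 0 ≠ root then pvCompress root (nxt.set i root) (nxt.getD i 0) fuel else nxt

def pvNextFree (nxt : List Nat) (i : Nat) : Nat × List Nat :=
  let root := pvChase nxt i nxt.length
  (root, pvCompress root nxt i nxt.length)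

def pvLoopB (stride n : Nat) : List Int → List (Option Int) → List Nat → Nat → List (Option Int)
  | [], res, _, _ => res
  | c :: rest, res, nxt, slot =>
    let target := (slot + stride) % n
    let p1 := pvNextFree nxt target
    let p2 := if p1.1 = n then pvNextFree p1.2 0 else p1
    pvLoopB stride n rest (res.set p2.1 (some c)) (p2.2.set p2.1 (p2.1 + 1)) p2.1

def interleave_page_py_alt (chunks_on_page : List Int) : List Int :=
  let n := chunks_on_page.length
  if n ≤ 1 then chunks_on_page
  else
    match chunks_on_page with
    | [] => chunks_on_page
    | c0 :: rest =>
      let stride := if 7 ≤ n then 7 else 3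
      let res0 := (List.replicate n (none : Option Int)).set 0 (some c0)
      let nxt0 := (List.range (n + 1)).set 0 1
      (pvLoopB stride n rest res0 nxt0 0).map (fun o => o.getD 0)

-- ===== PRECONDITION & SPEC =====
def Spec_interleave_page_py (chunks_on_page : List Int) (out : List Int) : Prop := out = interleave_page_py_alt chunks_on_page
instance (chunks_on_page : List Int) (out : List Int) : Decidable (Spec_interleave_page_py chunks_on_page out) := by unfold Spec_interleave_page_py; infer_instance

-- ===== CLAIM =====
def Claim_equal_interleave_page_py : Prop := ∀ (chunks_on_page : List Int), Dom_interleave_page_py chunks_on_page → Spec_interleave_page_py chunks_on_page (interleave_page_py chunks_on_page)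

-- ===== LEMMAS AND PROOFS =====
-- `pvFree res` = the indices of the still-empty slots of `res`, in increasing order;
-- `pvInv res nxt` = B's pointer array is sound for `res`: pointers only skip occupied
-- slots, and a slot is a self-loop exactly when it is free (or the sentinel n)
def pvFree (res : List (Option Int)) : List Nat :=
  (List.range res.length).filter (fun j => res.getD j none == none)

lemma mem_pvFree (res : List (Option Int)) (j : Nat) :
    j ∈ pvFree res ↔ j < res.length ∧ res.getD j none = none := by
  simp [pvFree, List.mem_filter, List.mem_range]

lemma pairwise_pvFree (res : List (Option Int)) : (pvFree res).Pairwise (· < ·) :=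
  List.Pairwise.filter _ List.pairwise_lt_range

lemma probe_char (res : List (Option Int)) (k : Nat) :
    ∀ s fuel, s < res.length → k ≤ fuel →
    res.getD ((s + k) % res.length) none = none →
    (∀ j < k, res.getD ((s + j) % res.length) none ≠ none) →
    pvProbeA res s fuel = (s + k) % res.length := by
  induction k with
  | zero =>
    intro s fuel hs _ hfree _
    have hs' : s % res.length = s := Nat.mod_eq_of_lt hs
    rw [Nat.add_zero] at hfree ⊢
    rw [hs'] at hfree ⊢
    cases fuel with
    | zero => rfl
    | succ f =>
      unfold pvProbeA
      rw [if_neg]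
      intro ⟨h1, _⟩
      exact h1 hfree
  | succ k ih =>
    intro s fuel hs hfuel hfree hocc
    have hn : 0 < res.length := by omega
    obtain ⟨f, rfl⟩ : ∃ f, fuel = f + 1 := ⟨fuel - 1, by omega⟩
    have h0 : res.getD s none ≠ none := by
      have := hocc 0 (Nat.succ_pos _)
      rwa [Nat.add_zero, Nat.mod_eq_of_lt hs] at this
    have hany : res.any (fun r => r == none) = true := by
      rw [List.any_eq_true]
      have hlt : (s + (k+1)) % res.length < res.length := Nat.mod_lt _ hn
      refine ⟨res[(s + (k+1)) % res.length], List.getElem_mem hlt, ?_⟩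
      rw [List.getD_eq_getElem res none hlt] at hfree
      simp [hfree]
    unfold pvProbeA
    rw [if_pos ⟨h0, hany⟩]
    have hs1 : (s + 1) % res.length < res.length := Nat.mod_lt _ hn
    have key : ∀ j, ((s + 1) % res.length + j) % res.length = (s + (j + 1)) % res.length := by
      intro j
      rw [Nat.mod_add_mod]
      congr 1
      omega
    rw [ih ((s + 1) % res.length) f hs1 (by omega) (by rw [key]; exact hfree)
        (fun j hj => by rw [key]; exact hocc (j+1) (by omega))]
    rw [key]

lemma pvFree_set (res : List (Option Int)) (q : Nat) (c : Int) :
    pvFree (res.set q (some c)) = (pvFree res).filter (fun x => x != q) := by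
  unfold pvFree
  rw [List.length_set, List.filter_filter]
  apply List.filter_congr
  intro j hj
  rw [List.mem_range] at hj
  have hj' : j < (res.set q (some c)).length := by simpa using hj
  rw [List.getD_eq_getElem _ none hj', List.getD_eq_getElem _ none hj, List.getElem_set]
  by_cases h : q = j
  · subst h; simp
  · simp [h, Ne.symm h]


lemma length_pvFree_set (res : List (Option Int)) (q : Nat) (c : Int)
    (hq : q < res.length) (hfree : res.getD q none = none) :
    (pvFree (res.set q (some c))).length = (pvFree res).length - 1 := by
  rw [pvFree_set res q c]
  have hnd : (pvFree res).Nodup := (pairwise_pvFree res).imp ne_of_lt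
  rw [← hnd.erase_eq_filter q, List.length_erase_of_mem ((mem_pvFree res q).mpr ⟨hq, hfree⟩)]

lemma pvFree_init (n : Nat) (c0 : Int) (h : 1 ≤ n) :
    pvFree ((List.replicate n (none : Option Int)).set 0 (some c0)) = List.range' 1 (n-1) := by
  have hrep : pvFree (List.replicate n (none : Option Int)) = List.range n := by
    unfold pvFree
    simp
  rw [pvFree_set _ 0 c0, hrep]
  rw [show List.range n = 0 :: List.range' 1 (n-1) by
    rw [List.range_eq_range']
    rcases Nat.exists_eq_add_of_le h with ⟨k, rfl⟩
    rw [Nat.add_comm, List.range'_succ]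
    simp]
  rw [List.filter_cons]
  simp only [bne_self_eq_false]
  rw [List.filter_eq_self.mpr]
  · simp
  · intro a ha
    have : 1 ≤ a := (List.mem_range'_1.mp ha).1
    simp
    omega


def pvInv (res : List (Option Int)) (nxt : List Nat) : Prop :=
  nxt.length = res.length + 1 ∧
  (∀ i, i ≤ res.length → i ≤ nxt.getD i 0 ∧ nxt.getD i 0 ≤ res.length) ∧
  (∀ i, i ≤ res.length → (nxt.getD i 0 = i ↔ (i = res.length ∨ res.getD i none = none))) ∧
  (∀ i j, i ≤ res.length → i ≤ j → j < nxt.getD i 0 → res.getD j none ≠ none)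

lemma chase_spec (res : List (Option Int)) (nxt : List Nat) (hInv : pvInv res nxt) :
    ∀ fuel i, i ≤ res.length → res.length + 1 - i ≤ fuel →
    i ≤ pvChase nxt i fuel ∧ pvChase nxt i fuel ≤ res.length ∧
    (pvChase nxt i fuel = res.length ∨ res.getD (pvChase nxt i fuel) none = none) ∧
    (∀ j, i ≤ j → j < pvChase nxt i fuel → res.getD j none ≠ none) := by
  obtain ⟨hlen, hB, hC, hD⟩ := hInv
  intro fuel
  induction fuel with
  | zero => intro i hi hf; omega
  | succ f ih =>
    intro i hi hf
    by_cases h : nxt.getD i 0 ≠ i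
    · have hBi := hB i hi
      have hCi := hC i hi
      have hocc : ¬(i = res.length ∨ res.getD i none = none) := fun hc => h (hCi.mpr hc)
      push_neg at hocc
      obtain ⟨hin, hioc⟩ := hocc
      have hlt : i < nxt.getD i 0 := by omega
      have hstep : pvChase nxt i (f+1) = pvChase nxt (nxt.getD i 0) f := by
        conv_lhs => rw [pvChase]
        rw [if_pos h]
      obtain ⟨k1, k2, k3, k4⟩ := ih (nxt.getD i 0) (by omega) (by omega)
      rw [hstep]
      refine ⟨by omega, k2, k3, ?_⟩
      intro j hj1 hj2
      by_cases hj : j < nxt.getD i 0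
      · exact hD i j hi hj1 hj
      · exact k4 j (by omega) hj2
    · push_neg at h
      have hstep : pvChase nxt i (f+1) = i := by
        conv_lhs => rw [pvChase]
        rw [if_neg (by omega)]
      rw [hstep]
      have := (hC i hi).mp h
      refine ⟨le_refl _, hi, ?_, by omega⟩
      rcases this with h1 | h1
      · exact Or.inl h1
      · exact Or.inr h1

lemma getD_set_self (l : List Nat) (i v : Nat) (h : i < l.length) :
    (l.set i v).getD i 0 = v := by
  rw [List.getD_eq_getElem _ _ (show i < (l.set i v).length by simpa using h),
    List.getElem_set_self (by simpa using h)]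

lemma getD_set_ne (l : List Nat) (k i v : Nat) (h : k ≠ i) :
    (l.set k v).getD i 0 = l.getD i 0 := by
  rcases Nat.lt_or_ge i l.length with hi | hi
  · rw [List.getD_eq_getElem _ _ (by simpa using hi), List.getD_eq_getElem _ _ hi,
      List.getElem_set_ne h]
  · rw [List.getD_eq_default _ _ (by simpa using hi), List.getD_eq_default _ _ hi]

lemma chase_congr_set (res : List (Option Int)) (nxt : List Nat) (hInv : pvInv res nxt) (k v : Nat) :
    ∀ fuel i, k < i → i ≤ res.length →
    pvChase (nxt.set k v) i fuel = pvChase nxt i fuel := by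
  obtain ⟨hlen, hB, hC, hD⟩ := hInv
  intro fuel
  induction fuel with
  | zero => intro i _ _; rfl
  | succ f ih =>
    intro i hk hi
    have hgd : (nxt.set k v).getD i 0 = nxt.getD i 0 := getD_set_ne _ _ _ _ (by omega)
    by_cases h : nxt.getD i 0 ≠ i
    · have hBi := hB i hi
      conv_lhs => rw [pvChase]
      conv_rhs => rw [pvChase]
      rw [if_pos (by rw [hgd]; exact h), if_pos h, hgd]
      exact ih (nxt.getD i 0) (by omega) (by omega)
    · push_neg at h
      conv_lhs => rw [pvChase]
      conv_rhs => rw [pvChase]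
      rw [if_neg (by rw [hgd]; omega), if_neg (by omega)]

lemma compress_inv (res : List (Option Int)) (root : Nat) :
    ∀ fuel nxt i, pvInv res nxt → i ≤ res.length →
    res.length + 1 - i ≤ fuel →
    pvChase nxt i fuel = root →
    pvInv res (pvCompress root nxt i fuel) := by
  intro fuel
  induction fuel with
  | zero => intro nxt i _ hi hf _; omega
  | succ f ih =>
    intro nxt i hInv hi hf hroot
    by_cases h : nxt.getD i 0 ≠ root
    · obtain ⟨hlen, hB, hC, hD⟩ := hInv
      have hii : nxt.getD i 0 ≠ i := by
        intro he
        have : pvChase nxt i (f+1) = i := by conv_lhs => rw [pvChase]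
                                             rw [if_neg (by omega)]
        rw [hroot] at this
        exact h (by omega)
      have hBi := hB i hi
      have hCi := hC i hi
      have hocc : ¬(i = res.length ∨ res.getD i none = none) := fun hc => hii (hCi.mpr hc)
      push_neg at hocc
      obtain ⟨hin, hioc⟩ := hocc
      obtain ⟨c1, c2, c3, c4⟩ := chase_spec res nxt ⟨hlen, hB, hC, hD⟩ (f+1) i hi hf
      rw [hroot] at c1 c2 c3 c4
      have hle : nxt.getD i 0 ≤ res.length := (hB i hi).2
      have hgt : i < nxt.getD i 0 := by have := hB i hi; omega
      have hstep0 : pvChase nxt i (f+1) = pvChase nxt (nxt.getD i 0) f := by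
        conv_lhs => rw [pvChase]
        rw [if_pos (by omega)]
      have hchain : pvChase nxt (nxt.getD i 0) f = root := by rw [← hstep0, hroot]
      have hir : i < root := by
        obtain ⟨d1, _, _, _⟩ := chase_spec res nxt ⟨hlen, hB, hC, hD⟩ f (nxt.getD i 0) hle (by omega)
        omega
      -- Inv for nxt.set i root
      have hInv1 : pvInv res (nxt.set i root) := by
        refine ⟨by simpa using hlen, ?_, ?_, ?_⟩
        · intro j hj
          by_cases hji : j = i
          · subst hji
            rw [getD_set_self _ _ _ (by omega)]
            omega
          · rw [getD_set_ne _ _ _ _ (by omega)]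
            exact hB j hj
        · intro j hj
          by_cases hji : j = i
          · subst hji
            rw [getD_set_self _ _ _ (by omega)]
            constructor
            · intro he; omega
            · intro hc; exact absurd hc (by push_neg; exact ⟨hin, hioc⟩)
          · rw [getD_set_ne _ _ _ _ (by omega)]
            exact hC j hj
        · intro a j ha haj hj
          by_cases hai : a = i
          · subst hai
            rw [getD_set_self _ _ _ (by omega)] at hj
            exact c4 j haj hj
          · rw [getD_set_ne _ _ _ _ (by omega)] at hj
            exact hD a j ha haj hj
      have hstep : pvCompress root nxt i (f+1)
          = pvCompress root (nxt.set i root) (nxt.getD i 0) f := by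
        conv_lhs => rw [pvCompress]
        rw [if_pos h]
      rw [hstep]
      refine ih (nxt.set i root) (nxt.getD i 0) hInv1 hle (by omega) ?_
      rw [chase_congr_set res nxt ⟨hlen, hB, hC, hD⟩ i root f (nxt.getD i 0) hgt hle]
      exact hchain
    · push_neg at h
      have hstep : pvCompress root nxt i (f+1) = nxt := by
        conv_lhs => rw [pvCompress]
        rw [if_neg (by omega)]
      rw [hstep]
      exact hInv

lemma getDo_set_self (l : List (Option Int)) (i : Nat) (v : Option Int) (h : i < l.length) :
    (l.set i v).getD i none = v := by
  rw [List.getD_eq_getElem _ _ (show i < (l.set i v).length by simpa using h),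
    List.getElem_set_self (by simpa using h)]

lemma getDo_set_ne (l : List (Option Int)) (k i : Nat) (v : Option Int) (h : k ≠ i) :
    (l.set k v).getD i none = l.getD i none := by
  rcases Nat.lt_or_ge i l.length with hi | hi
  · rw [List.getD_eq_getElem _ _ (by simpa using hi), List.getD_eq_getElem _ _ hi,
      List.getElem_set_ne h]
  · rw [List.getD_eq_default _ _ (by simpa using hi), List.getD_eq_default _ _ hi]

lemma occupy_inv (res : List (Option Int)) (nxt : List Nat) (q : Nat) (c : Int)
    (hInv : pvInv res nxt) (hq : q < res.length) :
    pvInv (res.set q (some c)) (nxt.set q (q + 1)) := by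
  obtain ⟨hlen, hB, hC, hD⟩ := hInv
  refine ⟨by simp [hlen], ?_, ?_, ?_⟩
  · intro i hi
    simp only [List.length_set] at hi ⊢
    by_cases hiq : i = q
    · subst hiq; rw [getD_set_self _ _ _ (by omega)]; omega
    · rw [getD_set_ne _ _ _ _ (by omega)]; exact hB i hi
  · intro i hi
    simp only [List.length_set] at hi ⊢
    by_cases hiq : i = q
    · subst hiq
      rw [getD_set_self _ _ _ (by omega), getDo_set_self _ _ _ (by omega)]
      constructor
      · intro he; omega
      · intro hc
        rcases hc with hc | hc
        · omega
        · exact absurd hc (by simp)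
    · rw [getD_set_ne _ _ _ _ (by omega), getDo_set_ne _ _ _ _ (by omega)]
      exact hC i hi
  · intro a j ha haj hj
    simp only [List.length_set] at ha ⊢
    by_cases haq : a = q
    · subst haq
      rw [getD_set_self _ _ _ (by omega)] at hj
      have hja : j = a := by omega
      subst hja
      rw [getDo_set_self _ _ _ (by omega)]
      simp
    · rw [getD_set_ne _ _ _ _ (by omega)] at hj
      by_cases hjq : j = q
      · subst hjq
        rw [getDo_set_self _ _ _ (by omega)]
        simp
      · rw [getDo_set_ne _ _ _ _ (by omega)]
        exact hD a j ha haj hj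

lemma init_inv (n : Nat) (c0 : Int) (h2 : 2 ≤ n) :
    pvInv ((List.replicate n (none : Option Int)).set 0 (some c0))
      ((List.range (n + 1)).set 0 1) := by
  have hlr : ((List.replicate n (none : Option Int)).set 0 (some c0)).length = n := by simp
  have hgr : ∀ i, i ≤ n → ((List.range (n + 1)).set 0 1).getD i 0 = if i = 0 then 1 else i := by
    intro i hi
    by_cases h : i = 0
    · subst h; rw [getD_set_self _ _ _ (by simp)]; simp
    · rw [getD_set_ne _ _ _ _ (Ne.symm h), if_neg h,
        List.getD_eq_getElem _ _ (by simp; omega), List.getElem_range]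
  have hgrs : ∀ i, i ≤ n → ((List.replicate n (none : Option Int)).set 0 (some c0)).getD i none
      = if i = 0 then some c0 else none := by
    intro i hi
    by_cases h : i = 0
    · subst h; rw [getDo_set_self _ _ _ (by simp; omega)]; simp
    · rw [getDo_set_ne _ _ _ _ (Ne.symm h), if_neg h]
      rcases Nat.lt_or_ge i n with hin | hin
      · rw [List.getD_eq_getElem _ _ (by simp; omega)]; simp
      · rw [List.getD_eq_default _ _ (by simp; omega)]
  refine ⟨by simp [hlr], ?_, ?_, ?_⟩
  · intro i hi
    rw [hlr] at hi
    rw [hlr, hgr i hi]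
    by_cases h : i = 0
    · rw [if_pos h]; omega
    · rw [if_neg h]; omega
  · intro i hi
    rw [hlr] at hi
    rw [hlr, hgr i hi, hgrs i hi]
    by_cases h : i = 0
    · subst h; simp; omega
    · simp [h]
  · intro a j ha haj hj
    rw [hlr] at ha
    rw [hgr a ha] at hj
    by_cases h : a = 0
    · subst h
      simp at hj
      have : j = 0 := by omega
      subst this
      rw [hgrs 0 (by omega)]
      simp
    · rw [if_neg h] at hj; omega

lemma loopB_cons (stride n : Nat) (c : Int) (rest : List Int) (res : List (Option Int))
    (nxt : List Nat) (slot : Nat) :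
    pvLoopB stride n (c :: rest) res nxt slot =
      pvLoopB stride n rest
        (res.set (if (pvNextFree nxt ((slot + stride) % n)).1 = n
            then pvNextFree (pvNextFree nxt ((slot + stride) % n)).2 0
            else pvNextFree nxt ((slot + stride) % n)).1 (some c))
        ((if (pvNextFree nxt ((slot + stride) % n)).1 = n
            then pvNextFree (pvNextFree nxt ((slot + stride) % n)).2 0
            else pvNextFree nxt ((slot + stride) % n)).2.set
          (if (pvNextFree nxt ((slot + stride) % n)).1 = n
            then pvNextFree (pvNextFree nxt ((slot + stride) % n)).2 0
            else pvNextFree nxt ((slot + stride) % n)).1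
          ((if (pvNextFree nxt ((slot + stride) % n)).1 = n
            then pvNextFree (pvNextFree nxt ((slot + stride) % n)).2 0
            else pvNextFree nxt ((slot + stride) % n)).1 + 1))
        (if (pvNextFree nxt ((slot + stride) % n)).1 = n
            then pvNextFree (pvNextFree nxt ((slot + stride) % n)).2 0
            else pvNextFree nxt ((slot + stride) % n)).1 := rfl

lemma loop_eq (stride n : Nat) :
    ∀ (rest : List Int) (res : List (Option Int)) (nxt : List Nat) (s : Nat),
    res.length = n → pvInv res nxt → s < n →
    (pvFree res).length = rest.length →
    pvLoopA stride rest res (pvProbeA res ((s + stride) % n) n)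
      = pvLoopB stride n rest res nxt s := by
  intro rest
  induction rest with
  | nil => intro res nxt s _ _ _ _; rfl
  | cons c rest ih =>
    intro res nxt s hres hInv hs hcnt
    have hn0 : 0 < n := by omega
    set t := (s + stride) % n with htdef
    have ht : t < n := Nat.mod_lt _ hn0
    have hlen : nxt.length = res.length + 1 := hInv.1
    obtain ⟨j0, hj0⟩ : ∃ j0, j0 ∈ pvFree res := by
      have hne : pvFree res ≠ [] := by intro h; rw [h] at hcnt; simp at hcnt
      exact ⟨(pvFree res).head hne, List.head_mem hne⟩
    obtain ⟨hj0n, hj0f⟩ := (mem_pvFree res j0).mp hj0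
    rw [hres] at hj0n
    set r := pvChase nxt t nxt.length with hrdef
    obtain ⟨c1, c2, c3, c4⟩ := chase_spec res nxt hInv nxt.length t (by omega) (by omega)
    rw [← hrdef] at c1 c2 c3 c4
    rw [hres] at c2 c3
    set nxt1 := pvCompress r nxt t nxt.length with hnxt1def
    have hInv1 : pvInv res nxt1 :=
      compress_inv res r nxt.length nxt t hInv (by omega) (by omega) hrdef.symm
    have hp1 : pvNextFree nxt t = (r, nxt1) := rfl
    rw [loopB_cons, hp1]
    by_cases hrn : r = n
    · -- wrap around: take the lowest free slot via a second next_free on nxt1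
      have hlen1 : nxt1.length = res.length + 1 := hInv1.1
      set r2 := pvChase nxt1 0 nxt1.length with hr2def
      obtain ⟨d1, d2, d3, d4⟩ := chase_spec res nxt1 hInv1 nxt1.length 0 (by omega) (by omega)
      rw [← hr2def] at d1 d2 d3 d4
      rw [hres] at d2 d3
      have hr2n : r2 < n := by
        rcases Nat.lt_or_ge r2 n with h | h
        · exact h
        · exact absurd (d4 j0 (by omega) (by omega) hj0f) (by simp)
      have hr2f : res.getD r2 none = none := by
        rcases d3 with h | h
        · omega
        · exact h
      have htocc : ∀ j, t ≤ j → j < n → res.getD j none ≠ none := by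
        intro j h1 h2
        exact c4 j h1 (by omega)
      have hr2t : r2 < t := by
        rcases Nat.lt_or_ge r2 t with h | h
        · exact h
        · exact absurd hr2f (htocc r2 h hr2n)
      have hq : pvProbeA res t res.length = r2 := by
        refine Eq.trans (probe_char res (r2 + n - t) t res.length (by omega) (by omega)
          ?_ ?_) ?_
        · rw [hres, show t + (r2 + n - t) = r2 + n by omega, Nat.add_mod_right,
            Nat.mod_eq_of_lt (by omega)]
          exact hr2f
        · intro d hd
          rw [hres]
          rcases Nat.lt_or_ge (t + d) n with hlt | hge
          · rw [Nat.mod_eq_of_lt hlt]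
            exact htocc (t + d) (by omega) hlt
          · rw [Nat.mod_eq_sub_mod hge, Nat.mod_eq_of_lt (by omega)]
            exact d4 (t + d - n) (by omega) (by omega)
        · rw [hres, show t + (r2 + n - t) = r2 + n by omega, Nat.add_mod_right,
            Nat.mod_eq_of_lt (by omega)]
      set nxt2 := pvCompress r2 nxt1 0 nxt1.length with hnxt2def
      have hInv2 : pvInv res nxt2 :=
        compress_inv res r2 nxt1.length nxt1 0 hInv1 (by omega) (by omega) hr2def.symm
      have hp2 : pvNextFree nxt1 0 = (r2, nxt2) := rfl
      rw [if_pos hrn, hp2]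
      have hA : pvLoopA stride (c :: rest) res (pvProbeA res t n)
          = pvLoopA stride rest (res.set (pvProbeA res t n) (some c))
              (pvProbeA (res.set (pvProbeA res t n) (some c))
                ((pvProbeA res t n + stride) % (res.set (pvProbeA res t n) (some c)).length)
                (res.set (pvProbeA res t n) (some c)).length) := rfl
      rw [hA]
      rw [show pvProbeA res t n = r2 by rw [← hres]; exact hq]
      simp only [List.length_set, hres]
      exact ih (res.set r2 (some c)) (nxt2.set r2 (r2 + 1)) r2
        (by simp [hres]) (occupy_inv res nxt2 r2 c hInv2 (by omega)) hr2n
        (by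
          rw [length_pvFree_set res r2 c (by omega) hr2f]
          simp at hcnt
          omega)
    · -- direct hit: r is the first free slot at or after t
      have hrn' : r < n := by omega
      have hrf : res.getD r none = none := by
        rcases c3 with h | h
        · omega
        · exact h
      have hq : pvProbeA res t res.length = r := by
        refine Eq.trans (probe_char res (r - t) t res.length (by omega) (by omega) ?_ ?_) ?_
        · rw [hres, show t + (r - t) = r by omega, Nat.mod_eq_of_lt (by omega)]
          exact hrf
        · intro d hd
          rw [hres, Nat.mod_eq_of_lt (by omega)]
          exact c4 (t + d) (by omega) (by omega)
        · rw [hres, show t + (r - t) = r by omega, Nat.mod_eq_of_lt (by omega)]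
      rw [if_neg hrn]
      have hA : pvLoopA stride (c :: rest) res (pvProbeA res t n)
          = pvLoopA stride rest (res.set (pvProbeA res t n) (some c))
              (pvProbeA (res.set (pvProbeA res t n) (some c))
                ((pvProbeA res t n + stride) % (res.set (pvProbeA res t n) (some c)).length)
                (res.set (pvProbeA res t n) (some c)).length) := rfl
      rw [hA]
      rw [show pvProbeA res t n = r by rw [← hres]; exact hq]
      simp only [List.length_set, hres]
      exact ih (res.set r (some c)) (nxt1.set r (r + 1)) r
        (by simp [hres]) (occupy_inv res nxt1 r c hInv1 (by omega)) hrn'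
        (by
          rw [length_pvFree_set res r c (by omega) hrf]
          simp at hcnt
          omega)

lemma interleave_page_py_eq_alt (chunks_on_page : List Int) :
    interleave_page_py chunks_on_page = interleave_page_py_alt chunks_on_page := by
  unfold interleave_page_py interleave_page_py_alt
  by_cases h : chunks_on_page.length ≤ 1
  · simp [h]
  · cases chunks_on_page with
    | nil => simp at h
    | cons c0 rest =>
      simp only [if_neg h]
      set n := (c0 :: rest).length with hn
      have hn2 : 2 ≤ n := by omega
      set st : Nat := if 7 ≤ n then 7 else 3 with hst
      set res0 := (List.replicate n (none : Option Int)).set 0 (some c0) with hres0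
      set nxt0 := (List.range (n + 1)).set 0 1 with hnxt0
      have hlen0 : res0.length = n := by rw [hres0]; simp
      have hfl : (pvFree res0).length = rest.length := by
        rw [hres0, pvFree_init n c0 (by omega)]
        simp [hn]
      have hInv0 : pvInv res0 nxt0 := init_inv n c0 hn2
      have hloop := loop_eq st n rest res0 nxt0 0 hlen0 hInv0 (by omega) hfl
      have hA : pvLoopA st (c0 :: rest) (List.replicate n (none : Option Int)) 0
          = pvLoopA st rest res0 (pvProbeA res0 ((0 + st) % res0.length) res0.length) := by
        show pvLoopA st rest ((List.replicate n (none : Option Int)).set 0 (some c0)) _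
            = _
        rw [← hres0]
      rw [hA, hlen0, hloop]

-- ===== VERDICT =====
theorem interleave_page_py_spec : Claim_equal_interleave_page_py := by
  intro chunks_on_page _
  unfold Spec_interleave_page_py
  exact interleave_page_py_eq_alt chunks_on_page
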